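-- pv_equiv track=rewrite | github.com/jacob-fenster/NGS_gRNA | test_data/pMSA_algorithm/scripts/MSA_cluster_exact_match.py | unique_strings_with_descs
-- ===== SOURCE A (Python) =====
-- def unique_strings_with_descs(alns, descs):
--     unique_dict = {}
--     for string, description in zip(alns, descs):
--         if description == 'query':
--             unique_dict[string] = description
--         elif string not in unique_dict:
--             unique_dict[string] = description
--     unique_alns = list(unique_dict.keys())
--     unique_descs = list(unique_dict.values())
--     return unique_alns, unique_descs
-- ===== SOURCE B (Python) =====
-- def unique_strings_with_descs(alns, descs):
--     pairs = list(zip(alns, descs))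
--     result = {}
--     # pass 1: first-seen description per string, in first-appearance order
--     for string, desc in pairs:
--         if string not in result:
--             result[string] = desc
--     # pass 2: 'query' descriptions override unconditionally
--     for string, desc in pairs:
--         if desc == 'query':
--             result[string] = desc
--     return list(result.keys()), list(result.values())
-- ===== Notes on version B (the rewrite author's own statement) =====
-- stated objective: simpler
-- what changed: Replaces A's single branching loop with two sequential passes: first collect the first-seen description per string, then apply 'query' as an unconditional override; keys/values are read off once at the end.
import Mathlib
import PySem

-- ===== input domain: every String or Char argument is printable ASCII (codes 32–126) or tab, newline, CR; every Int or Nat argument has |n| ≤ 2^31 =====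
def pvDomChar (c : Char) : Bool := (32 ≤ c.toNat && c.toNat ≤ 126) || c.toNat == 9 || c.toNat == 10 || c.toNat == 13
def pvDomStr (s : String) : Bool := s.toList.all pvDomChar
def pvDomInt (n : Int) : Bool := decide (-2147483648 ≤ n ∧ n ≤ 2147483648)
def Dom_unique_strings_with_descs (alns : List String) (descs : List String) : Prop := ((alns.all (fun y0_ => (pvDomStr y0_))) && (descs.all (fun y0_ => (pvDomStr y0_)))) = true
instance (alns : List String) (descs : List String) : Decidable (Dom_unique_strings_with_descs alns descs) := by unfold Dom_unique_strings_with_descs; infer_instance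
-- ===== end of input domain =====

-- B differs from A by decomposition only (two sequential passes instead of one branching loop); same O(n) cost.

-- ===== PORT A =====
-- one loop over zip(alns, descs): 'query' always writes, otherwise write only if the string is new
def unique_strings_with_descs (alns : List String) (descs : List String) : List String × List String :=
  let d := (alns.zip descs).foldl
    (fun d p =>
      if p.2 = "query" then d.insert p.1 p.2
      else if !(d.contains p.1) then d.insert p.1 p.2
      else d)
    PySem.Dict.empty
  (d.keys, d.values)

-- ===== PORT B =====
-- pass 1: first-seen description per string; pass 2: 'query' overrides unconditionally
def unique_strings_with_descs_alt (alns : List String) (descs : List String) : List String × List String :=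
  let pairs := alns.zip descs
  let d1 := pairs.foldl
    (fun d p => if !(d.contains p.1) then d.insert p.1 p.2 else d)
    PySem.Dict.empty
  let d2 := pairs.foldl
    (fun d p => if p.2 = "query" then d.insert p.1 p.2 else d)
    d1
  (d2.keys, d2.values)

-- ===== PRECONDITION & SPEC =====
def Spec_unique_strings_with_descs (alns : List String) (descs : List String) (out : List String × List String) : Prop := out = unique_strings_with_descs_alt alns descs
instance (alns : List String) (descs : List String) (out : List String × List String) : Decidable (Spec_unique_strings_with_descs alns descs out) := by unfold Spec_unique_strings_with_descs; infer_instance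

-- ===== CLAIM (what is proved, stated in full; the proofs are below) =====
def Claim_equal_unique_strings_with_descs : Prop := ∀ (alns : List String) (descs : List String), Dom_unique_strings_with_descs alns descs → Spec_unique_strings_with_descs alns descs (unique_strings_with_descs alns descs)

-- ===== LEMMAS AND PROOFS =====

-- inserting a fresh key commutes with overwriting an already-present key
lemma insert_comm_present (d : PySem.Dict String String) (s t v : String)
    (hs : d.contains s = true) (ht : d.contains t = false) :
    (d.insert s "query").insert t v = (d.insert t v).insert s "query" := by
  have hst : t ≠ s := by intro h; rw [h] at ht; simp [ht] at hs
  apply PySem.Dict.ext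
  rw [PySem.Dict.items_insert, PySem.Dict.items_insert, PySem.Dict.items_insert,
      PySem.Dict.items_insert]
  simp [PySem.Dict.contains_insert, hs, ht, hst, beq_iff_eq]

-- pass 1 commutes with overwriting a key the accumulator already contains
lemma pass1_insert_query (p : List (String × String)) :
    ∀ (d : PySem.Dict String String) (s : String), d.contains s = true →
    p.foldl (fun d p => if !(d.contains p.1) then d.insert p.1 p.2 else d) (d.insert s "query")
      = (p.foldl (fun d p => if !(d.contains p.1) then d.insert p.1 p.2 else d) d).insert s "query" := by
  induction p with
  | nil => intro d s _; simp [List.foldl]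
  | cons hd tl ih =>
    intro d s hs
    obtain ⟨t, v⟩ := hd
    by_cases hd1 : d.contains t = true
    · have h2 : (d.insert s "query").contains t = true := by
        rw [PySem.Dict.contains_insert]; simp [hd1]
      simp only [List.foldl_cons, h2, hd1, Bool.not_true, Bool.false_eq_true, if_false]
      exact ih d s hs
    · have hd1' : d.contains t = false := by simpa using hd1
      have hst : t ≠ s := by intro h; rw [h] at hd1'; rw [hd1'] at hs; exact Bool.false_ne_true hs
      have h2 : (d.insert s "query").contains t = false := by
        rw [PySem.Dict.contains_insert]; simp [hd1', hst]
      simp only [List.foldl_cons, h2, hd1', Bool.not_false]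
      rw [insert_comm_present d s t v hs hd1']
      exact ih (d.insert t v) s (by rw [PySem.Dict.contains_insert]; simp [hs])

-- A's single loop equals pass 2 applied after pass 1, for any starting dict
lemma one_pass_eq_two_pass (p : List (String × String)) :
    ∀ (d : PySem.Dict String String),
    p.foldl (fun d p =>
        if p.2 = "query" then d.insert p.1 p.2
        else if !(d.contains p.1) then d.insert p.1 p.2
        else d) d
      = p.foldl (fun d p => if p.2 = "query" then d.insert p.1 p.2 else d)
          (p.foldl (fun d p => if !(d.contains p.1) then d.insert p.1 p.2 else d) d) := by
  induction p with
  | nil => intro d; simp [List.foldl]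
  | cons hd tl ih =>
    intro d
    obtain ⟨s, de⟩ := hd
    by_cases hq : de = "query"
    · subst hq
      simp only [List.foldl_cons, if_true]
      rw [ih (d.insert s "query")]
      congr 1
      by_cases hc : d.contains s = true
      · simp only [hc, Bool.not_true, Bool.false_eq_true, if_false]
        exact pass1_insert_query tl d s hc
      · have hc' : d.contains s = false := by simpa using hc
        simp only [hc', Bool.not_false, if_true]
        have h := pass1_insert_query tl (d.insert s "query") s
          (by rw [PySem.Dict.contains_insert]; simp)
        rw [PySem.Dict.insert_insert_self] at h
        exact h
    · simp only [List.foldl_cons, if_neg hq]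
      exact ih _

-- ===== VERDICT (by name: the statement is the Claim_ definition above) =====
theorem unique_strings_with_descs_spec : Claim_equal_unique_strings_with_descs := by
  intro alns descs _
  unfold Spec_unique_strings_with_descs unique_strings_with_descs unique_strings_with_descs_alt
  rw [one_pass_eq_two_pass (alns.zip descs) PySem.Dict.empty]
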